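-- pv_equiv track=rewrite | github.com/sidazhang123/zsdtdx | src/zsdtdx/parallel_fetcher.py | _summarize_worker_std_host_distribution
-- ===== SOURCE A (Python) =====
-- from typing import Any, Callable, Dict, List, Optional, Tuple
--
-- def _summarize_worker_std_host_distribution(worker_std_host_map: Dict[int, str]) -> Dict[str, int]:
--     """
--     汇总 worker 到标准行情 host 的分布统计。
--
--     输入：
--     1. worker_std_host_map: worker_pid -> active_std_host 映射。
--     输出：
--     1. host -> worker_count 统计字典。
--     用途：
--     1. 在 prewarm 摘要中观察 worker 连接是否明显集中在少数 IP。
--     边界条件：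
--     1. 空映射返回空字典；空 host 会被自动忽略。
--     """
--     counter: Dict[str, int] = {}
--     for raw_host in list(worker_std_host_map.values()):
--         host = str(raw_host or "").strip()
--         if host == "":
--             continue
--         counter[host] = int(counter.get(host, 0)) + 1
--     return {host: int(counter[host]) for host in sorted(counter.keys())}
-- ===== SOURCE B (Python) =====
-- from typing import Dict
--
--
-- def _summarize_worker_std_host_distribution(worker_std_host_map: Dict[int, str]) -> Dict[str, int]:
--     # Sort the normalized non-empty hosts, then emit one (host, run-length) entry
--     # per run of equal values: the output dict is key-sorted by construction.
--     hosts = sorted(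
--         h
--         for h in (str(raw or "").strip() for raw in worker_std_host_map.values())
--         if h != ""
--     )
--     result: Dict[str, int] = {}
--     cur = None
--     cnt = 0
--     for h in hosts:
--         if h == cur:
--             cnt += 1
--         else:
--             if cur is not None:
--                 result[cur] = cnt
--             cur, cnt = h, 1
--     if cur is not None:
--         result[cur] = cnt
--     return result
-- ===== Notes on version B (the rewrite author's own statement) =====
-- stated objective: alternative
-- what changed: Replaces A's hash-counter pass followed by sorting the counter's keys with a sort-the-normalized-values-first strategy that scans the sorted list once, emitting one entry per run of equal hosts.
import Mathlib
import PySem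

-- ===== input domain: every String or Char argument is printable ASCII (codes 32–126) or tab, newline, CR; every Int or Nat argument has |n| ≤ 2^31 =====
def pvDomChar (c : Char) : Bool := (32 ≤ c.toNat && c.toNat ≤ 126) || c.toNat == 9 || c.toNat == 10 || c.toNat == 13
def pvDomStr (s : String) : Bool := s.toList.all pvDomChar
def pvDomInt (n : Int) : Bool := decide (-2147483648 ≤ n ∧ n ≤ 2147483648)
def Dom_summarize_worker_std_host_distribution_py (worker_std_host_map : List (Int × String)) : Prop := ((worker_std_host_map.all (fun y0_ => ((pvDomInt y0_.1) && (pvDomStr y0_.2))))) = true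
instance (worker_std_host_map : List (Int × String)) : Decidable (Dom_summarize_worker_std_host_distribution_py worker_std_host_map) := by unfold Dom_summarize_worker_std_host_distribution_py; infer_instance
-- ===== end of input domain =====

-- B sorts the normalized non-empty host values first and emits one entry per run of
-- equal hosts in a single scan, instead of A's hash-counter pass + sort of its keys.


-- ===== PORT A =====
def summarize_worker_std_host_distribution_py (worker_std_host_map : List (Int × String)) : List (String × Int) :=
  let counter : PySem.Dict String Int :=
    (worker_std_host_map.map (fun p => p.2)).foldl
      (fun d raw_host =>
        -- host = str(raw_host or "").strip(): on a str argument this is just .strip()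
        let host := PySem.Str.strip raw_host
        if host = "" then d
        else d.insert host (d.getD host 0 + 1))
      PySem.Dict.empty
  -- counter[host]: the key is always present (it comes from counter.keys), so getD is exact
  (PySem.List.sorted counter.keys (fun h => h) false).map
    (fun host => (host, counter.getD host 0))

-- ===== PORT B =====
-- the run-scan loop of Source B: (cur, cnt) is the current run's host and length
def pvGroupRunsAux (cur : String) (cnt : Int) : List String → List (String × Int)
  | [] => [(cur, cnt)]
  | h :: hs => if h = cur then pvGroupRunsAux cur (cnt + 1) hs
               else (cur, cnt) :: pvGroupRunsAux h 1 hs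

-- Source B's loop with initial state cur = None
def pvGroupRuns : List String → List (String × Int)
  | [] => []
  | h :: hs => pvGroupRunsAux h 1 hs

def summarize_worker_std_host_distribution_py_alt (worker_std_host_map : List (Int × String)) : List (String × Int) :=
  let hosts := PySem.List.sorted
    (((worker_std_host_map.map (fun p => p.2)).map PySem.Str.strip).filter (fun h => h ≠ ""))
    (fun h => h) false
  pvGroupRuns hosts

-- ===== PRECONDITION & SPEC =====
def Spec_summarize_worker_std_host_distribution_py (worker_std_host_map : List (Int × String)) (out : List (String × Int)) : Prop := out = summarize_worker_std_host_distribution_py_alt worker_std_host_map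
instance (worker_std_host_map : List (Int × String)) (out : List (String × Int)) : Decidable (Spec_summarize_worker_std_host_distribution_py worker_std_host_map out) := by unfold Spec_summarize_worker_std_host_distribution_py; infer_instance

-- ===== CLAIM (what is proved, stated in full; the proofs are below) =====
def Claim_equal_summarize_worker_std_host_distribution_py : Prop := ∀ (worker_std_host_map : List (Int × String)), Dom_summarize_worker_std_host_distribution_py worker_std_host_map → Spec_summarize_worker_std_host_distribution_py worker_std_host_map (summarize_worker_std_host_distribution_py worker_std_host_map)

-- ===== LEMMAS AND PROOFS =====

-- A's counting loop (skip empty, else bump) is the bump-loop over the filtered, stripped values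
lemma pv_foldA_eq_counter (vs : List String) (d : PySem.Dict String Int) :
    vs.foldl
      (fun d raw_host =>
        let host := PySem.Str.strip raw_host
        if host = "" then d
        else d.insert host (d.getD host 0 + 1)) d
    = ((vs.map PySem.Str.strip).filter (fun h => h ≠ "")).foldl
        (fun d h => d.insert h (d.getD h 0 + 1)) d := by
  induction vs generalizing d with
  | nil => rfl
  | cons v vs ih =>
    simp only [List.foldl_cons, List.map_cons, List.filter_cons]
    by_cases hv : PySem.Str.strip v = "" <;> simp [hv, ih]

-- the run scan on a sorted suffix whose elements all dominate cur
lemma pvGroupRunsAux_spec (cur : String) :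
    ∀ (s : List String) (cnt : Int), s.Pairwise (· ≤ ·) → (∀ y ∈ s, cur ≤ y) →
      pvGroupRunsAux cur cnt s
        = (cur, cnt + (s.count cur : Int)) :: pvGroupRuns (s.filter (fun y => y ≠ cur)) := by
  intro s
  induction s with
  | nil => intro cnt _ _; simp [pvGroupRunsAux, pvGroupRuns]
  | cons y ys ih =>
    intro cnt hp hge
    rcases List.pairwise_cons.mp hp with ⟨hyle, hp'⟩
    by_cases hy : y = cur
    · subst hy
      rw [show pvGroupRunsAux y cnt (y :: ys) = pvGroupRunsAux y (cnt + 1) ys from by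
        simp [pvGroupRunsAux]]
      rw [ih (cnt + 1) hp' hyle]
      simp [List.count_cons_self]
      ring
    · have hlt : cur < y := lt_of_le_of_ne (hge y List.mem_cons_self) (fun h => hy h.symm)
      have hnot : cur ∉ y :: ys := by
        intro hmem
        rcases List.mem_cons.mp hmem with h | h
        · exact hy h.symm
        · exact absurd (hyle cur h) (not_le.mpr hlt)
      have hcnt : (y :: ys).count cur = 0 := List.count_eq_zero.mpr hnot
      have hfil : ys.filter (fun z => !decide (z = cur)) = ys := by
        apply List.filter_eq_self.mpr
        intro a ha
        have : a ≠ cur := fun h => (not_le.mpr hlt) (h ▸ hyle a ha)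
        simp [this]
      simp [pvGroupRunsAux, hy, hcnt, pvGroupRuns, hfil]

-- main: the run scan of sorted(l) is the sorted distinct hosts paired with their counts in l
lemma pvGroupRuns_sorted : ∀ (n : Nat) (l : List String), l.length ≤ n →
    pvGroupRuns (PySem.List.sorted l (fun h => h) false)
      = (PySem.List.sorted (PySem.Set.ofList l) (fun h => h) false).map
          (fun h => (h, (l.count h : Int))) := by
  intro n
  induction n with
  | zero =>
    intro l hl
    have : l = [] := List.eq_nil_of_length_eq_zero (Nat.le_zero.mp hl)
    subst this; rfl
  | succ n ih =>
    intro l hl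
    rcases hS : PySem.List.sorted l (fun h => h) false with _ | ⟨x, xs⟩
    · have hnil : l = [] := (PySem.List.sorted_eq_nil_iff l _ _).mp hS
      subst hnil; rfl
    · have hperm : (x :: xs).Perm l := hS ▸ PySem.List.sorted_perm l (fun h => h) false
      have hxl : x ∈ l := hperm.mem_iff.mp List.mem_cons_self
      have hmin : ∀ y ∈ l, x ≤ y := PySem.List.key_head_sorted_le l (fun h => h) hS
      have hpair : (x :: xs).Pairwise (· ≤ ·) := by
        have := PySem.List.sorted_pairwise l (fun h => h)
        rwa [hS] at this
      rcases List.pairwise_cons.mp hpair with ⟨hxle, hp'⟩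
      set l' := l.filter (fun y => !decide (y = x)) with hl'def
      have hmem' : ∀ y, y ∈ l' ↔ y ∈ l ∧ y ≠ x := by
        intro y; simp [hl'def]
      -- the filtered tail is sorted(l')
      have hpermf : (xs.filter (fun y => !decide (y = x))).Perm l' := by
        have h0 := hperm.filter (fun y => !decide (y = x))
        simpa [List.filter_cons] using h0
      have hpf : (xs.filter (fun y => !decide (y = x))).Pairwise (· ≤ ·) :=
        hp'.sublist (List.filter_sublist (l := xs))
      have htail : xs.filter (fun y => !decide (y = x)) = PySem.List.sorted l' (fun h => h) false := by
        calc xs.filter (fun y => !decide (y = x))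
            = PySem.List.sorted (xs.filter (fun y => !decide (y = x))) (fun h => h) false :=
              (PySem.List.sorted_eq_self_of_pairwise _ _ hpf).symm
          _ = PySem.List.sorted l' (fun h => h) false :=
              PySem.List.sorted_eq_sorted_of_perm _ _ (fun h => h) (fun a b h => h) hpermf
      have hlen' : l'.length ≤ n := by
        have hlt : l'.length < l.length := by
          rw [hl'def]
          apply List.length_filter_lt_length_iff_exists.mpr
          exact ⟨x, hxl, by simp⟩
        omega
      -- sorted distinct hosts of l = x :: sorted distinct hosts of l'
      have hS'nodup : (PySem.List.sorted (PySem.Set.ofList l') (fun h => h) false).Nodup :=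
        (PySem.List.sorted_perm (PySem.Set.ofList l') (fun h => h) false).symm.nodup
          (PySem.Set.nodup_ofList l')
      have hS'mem : ∀ y, y ∈ PySem.List.sorted (PySem.Set.ofList l') (fun h => h) false ↔ y ∈ l ∧ y ≠ x := by
        intro y
        rw [(PySem.List.sorted_perm (PySem.Set.ofList l') (fun h => h) false).mem_iff,
            PySem.Set.mem_ofList]
        exact hmem' y
      have hsplit : PySem.List.sorted (PySem.Set.ofList l) (fun h => h) false
          = x :: PySem.List.sorted (PySem.Set.ofList l') (fun h => h) false := by
        apply PySem.List.sorted_eq_of_perm_of_pairwise_lt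
        · apply (List.perm_ext_iff_of_nodup _ (PySem.Set.nodup_ofList l)).mpr
          · intro a
            rw [List.mem_cons, hS'mem a, PySem.Set.mem_ofList]
            constructor
            · rintro (rfl | ⟨h1, _⟩) <;> [exact hxl; exact h1]
            · intro ha
              by_cases hax : a = x
              · exact Or.inl hax
              · exact Or.inr ⟨ha, hax⟩
          · apply List.nodup_cons.mpr
            refine ⟨fun hx' => ?_, hS'nodup⟩
            exact ((hS'mem x).mp hx').2 rfl
        · apply List.pairwise_cons.mpr
          refine ⟨fun y hy => ?_, ?_⟩
          · rcases (hS'mem y).mp hy with ⟨hyl, hyx⟩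
            exact lt_of_le_of_ne (hmin y hyl) (fun h => hyx h.symm)
          · exact PySem.List.sorted_ofList_pairwise_lt l'
      -- put it together
      show pvGroupRunsAux x 1 xs = _
      rw [pvGroupRunsAux_spec x xs 1 hp' hxle]
      simp only [ne_eq, decide_not]
      rw [htail, ih l' hlen', hsplit, List.map_cons]
      have hcx : (1 : Int) + (xs.count x : Int) = (l.count x : Int) := by
        have h1 : (x :: xs).count x = l.count x := hperm.count_eq x
        rw [List.count_cons_self] at h1
        push_cast [← h1]; ring
      rw [hcx]
      congr 1
      apply List.map_congr_left
      intro h hh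
      rcases (hS'mem h).mp hh with ⟨hhl, hhx⟩
      have : l'.count h = l.count h := by
        rw [hl'def, List.count_filter]
        simp [hhx]
      rw [this]

-- ===== VERDICT (by name: the statement is the Claim_ definition above) =====
theorem summarize_worker_std_host_distribution_py_spec : Claim_equal_summarize_worker_std_host_distribution_py := by
  intro m _
  unfold Spec_summarize_worker_std_host_distribution_py
  unfold summarize_worker_std_host_distribution_py summarize_worker_std_host_distribution_py_alt
  simp only [pv_foldA_eq_counter, PySem.Dict.foldl_insert_getD_add_one_eq_counter,
             PySem.Dict.keys_counter, PySem.Dict.getD_counter]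
  exact (pvGroupRuns_sorted _ _ le_rfl).symm
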